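-- pv_equiv track=rewrite | github.com/nkawarai/keibaTools | 点数計算/BakenCombinationCalculator.py | calculate_umatan_formation_points
-- ===== SOURCE A (Python) =====
-- def calculate_umatan_formation_points(line1, line2):
--     """
--     馬単フォーメーションの買い目点数を計算する
--     :param line1: 軸1の馬番号リスト
--     :param line2: 軸2の馬番号リスト
--     :return: 買い目の点数
--     """
--     permutations = []
--     for horse1 in line1:
--         for horse2 in line2:
--             if horse1 == horse2:  # 軸1と軸2で同じ馬を避ける
--                 continue
--             permutations.append([horse1, horse2])
--     return len(permutations)
-- ===== SOURCE B (Python) =====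
-- def calculate_umatan_formation_points(line1, line2):
--     # O(n+m): total ordered pairs minus pairs with equal horses, via a frequency dict on line2
--     freq = {}
--     for h in line2:
--         freq[h] = freq.get(h, 0) + 1
--     equal = 0
--     for h in line1:
--         equal += freq.get(h, 0)
--     return len(line1) * len(line2) - equal
-- ===== Notes on version B (the rewrite author's own statement) =====
-- stated objective: faster
-- what changed: Replaces the nested O(n*m) pair-building loop by counting: build a frequency dict of line2 once and return len1*len2 minus the number of equal pairs.
import Mathlib
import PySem

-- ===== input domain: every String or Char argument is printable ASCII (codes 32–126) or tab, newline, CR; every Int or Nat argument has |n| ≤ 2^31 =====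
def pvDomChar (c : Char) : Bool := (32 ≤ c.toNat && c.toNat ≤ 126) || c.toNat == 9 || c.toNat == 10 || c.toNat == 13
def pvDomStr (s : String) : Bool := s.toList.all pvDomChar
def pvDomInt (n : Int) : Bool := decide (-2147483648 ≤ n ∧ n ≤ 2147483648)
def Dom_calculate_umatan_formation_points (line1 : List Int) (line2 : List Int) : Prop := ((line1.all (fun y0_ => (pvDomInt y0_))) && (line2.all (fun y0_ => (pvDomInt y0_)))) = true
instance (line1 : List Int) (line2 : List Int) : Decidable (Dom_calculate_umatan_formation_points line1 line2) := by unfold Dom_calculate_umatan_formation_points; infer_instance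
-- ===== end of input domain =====

-- B counts equal pairs with a frequency dict and subtracts from len1*len2 (O(n+m) vs A's nested O(n*m)).

-- ===== PORT A =====
-- literal port: build the list of pairs [h1, h2] with h1 ≠ h2, return its length
def calculate_umatan_formation_points (line1 : List Int) (line2 : List Int) : Int :=
  let permutations :=
    line1.foldl (fun perms horse1 =>
      line2.foldl (fun perms horse2 =>
        if horse1 = horse2 then perms else perms ++ [[horse1, horse2]]) perms) []
  (permutations.length : Int)

-- ===== PORT B =====
def calculate_umatan_formation_points_alt (line1 : List Int) (line2 : List Int) : Int :=
  let freq : PySem.Dict Int Int :=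
    line2.foldl (fun d h => d.insert h (d.getD h 0 + 1)) PySem.Dict.empty
  let equal : Int := line1.foldl (fun s h => s + freq.getD h 0) 0
  (line1.length : Int) * (line2.length : Int) - equal

-- ===== PRECONDITION & SPEC =====
def Spec_calculate_umatan_formation_points (line1 : List Int) (line2 : List Int) (out : Int) : Prop := out = calculate_umatan_formation_points_alt line1 line2
instance (line1 : List Int) (line2 : List Int) (out : Int) : Decidable (Spec_calculate_umatan_formation_points line1 line2 out) := by unfold Spec_calculate_umatan_formation_points; infer_instance

-- ===== CLAIM (what is proved, stated in full; the proofs are below) =====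
def Claim_equal_calculate_umatan_formation_points : Prop := ∀ (line1 : List Int) (line2 : List Int), Dom_calculate_umatan_formation_points line1 line2 → Spec_calculate_umatan_formation_points line1 line2 (calculate_umatan_formation_points line1 line2)

-- ===== LEMMAS AND PROOFS =====

-- A's inner loop over line2 appends one pair per element of line2 differing from horse1
theorem pv_inner_len (h1 : Int) (line2 : List Int) :
    ∀ (ps : List (List Int)),
      (line2.foldl (fun perms horse2 =>
        if h1 = horse2 then perms else perms ++ [[h1, horse2]]) ps).length
      = ps.length + line2.countP (fun h2 => !(h1 == h2)) := by
  induction line2 with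
  | nil => intro ps; simp
  | cons x xs ih =>
    intro ps
    simp only [List.foldl_cons, List.countP_cons]
    by_cases h : h1 = x
    · simp only [if_pos h, ih]
      simp [h]
    · simp only [if_neg h, ih]
      simp [h]
      omega

-- A's outer loop accumulates those counts
theorem pv_outer_len (line2 : List Int) (line1 : List Int) :
    ∀ (ps : List (List Int)),
      (line1.foldl (fun perms horse1 =>
        line2.foldl (fun perms horse2 =>
          if horse1 = horse2 then perms else perms ++ [[horse1, horse2]]) perms) ps).length
      = ps.length + (line1.map (fun h1 => line2.countP (fun h2 => !(h1 == h2)))).sum := by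
  induction line1 with
  | nil => intro ps; simp
  | cons x xs ih =>
    intro ps
    simp [ih, pv_inner_len]
    omega

-- pointwise: mismatches + matches = length of line2
theorem pv_split (h1 : Int) (line2 : List Int) :
    line2.countP (fun h2 => !(h1 == h2)) + line2.count h1 = line2.length := by
  induction line2 with
  | nil => simp
  | cons x xs ih =>
    by_cases h : h1 = x
    · subst h
      simp only [List.countP_cons, List.count_cons]
      simp
      omega
    · simp only [List.countP_cons, List.count_cons]
      have h2 : ¬ (x = h1) := fun e => h e.symm
      simp [h, h2]
      omega

-- summed over line1
theorem pv_sum_split (line2 : List Int) (line1 : List Int) :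
    ((line1.map (fun h1 => line2.countP (fun h2 => !(h1 == h2)))).sum : Int)
      = (line1.length : Int) * (line2.length : Int)
        - (line1.map (fun h1 => (line2.count h1 : Int))).sum := by
  induction line1 with
  | nil => simp
  | cons x xs ih =>
    have hx := pv_split x line2
    simp [List.map_cons, List.sum_cons, ih]
    nlinarith [hx]

-- ===== VERDICT (by name: the statement is the Claim_ definition above) =====
theorem calculate_umatan_formation_points_spec : Claim_equal_calculate_umatan_formation_points := by
  intro line1 line2 _
  unfold Spec_calculate_umatan_formation_points
  unfold calculate_umatan_formation_points calculate_umatan_formation_points_alt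
  simp only [PySem.Dict.foldl_insert_getD_add_one_eq_counter]
  rw [PySem.List.foldl_add]
  simp only [PySem.Dict.getD_counter]
  rw [pv_outer_len]
  rw [List.length_nil, Nat.cast_add, Nat.cast_zero, zero_add, zero_add]
  rw [pv_sum_split]
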